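-- pv_equiv track=rewrite | github.com/wangyue-gagua/LeetcodeCup | 双周赛90/摧毁一系列目标.py | destroyTargets
-- ===== SOURCE A (Python) =====
-- from typing import List
--
-- def destroyTargets(nums: List[int], space: int) -> int:
--     """此方法超时 41 / 44 个通过测试用例"""
--     n = len(nums)
--     nums.sort()
--     searchedIndex = set()
--     minNum = 10**9
--     minNumCount = 0
--     for i in range(n):
--         if i in searchedIndex:
--             continue
--         # if n - i <= minNumCount:
--         #     break
--         searchedIndex.add(i)
--         count = 1
--         for j in range(i + 1, n):
--             if j in searchedIndex:
--                 continue
--             if (nums[j] - nums[i]) % space == 0: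
--                 count += 1
--                 searchedIndex.add(j)
--         if count > minNumCount:
--             minNum = nums[i]
--             minNumCount = count
--     return minNum
-- ===== SOURCE B (Python) =====
-- from typing import List
--
-- def destroyTargets(nums: List[int], space: int) -> int:
--     # Count each residue class once, then a single scan of the sorted list:
--     # the first index of each class sees the full class count, later indices
--     # never beat it.  (Does not mutate nums, unlike A which sorts in place;
--     # the equivalence is about the return value.)
--     xs = sorted(nums)
--     cnt = {}
--     for x in xs:
--         r = x % space
--         cnt[r] = cnt.get(r, 0) + 1
--     best, bestCount = None, 0
--     for x in xs:
--         c = cnt[x % space]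
--         if c > bestCount:
--             best, bestCount = x, c
--     return best
-- ===== Notes on version B (the rewrite author's own statement) =====
-- stated objective: faster
-- what changed: Replaces the quadratic searched-index nested scan with one dict pass counting each residue class num%space, then a single scan of the sorted list picking the first strict count improvement.
-- outside the precondition, e.g. on destroyTargets([], 5): A returns 1000000000, B returns None; on destroyTargets([3], 0): A returns 3, B raises ZeroDivisionError
import Mathlib
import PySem

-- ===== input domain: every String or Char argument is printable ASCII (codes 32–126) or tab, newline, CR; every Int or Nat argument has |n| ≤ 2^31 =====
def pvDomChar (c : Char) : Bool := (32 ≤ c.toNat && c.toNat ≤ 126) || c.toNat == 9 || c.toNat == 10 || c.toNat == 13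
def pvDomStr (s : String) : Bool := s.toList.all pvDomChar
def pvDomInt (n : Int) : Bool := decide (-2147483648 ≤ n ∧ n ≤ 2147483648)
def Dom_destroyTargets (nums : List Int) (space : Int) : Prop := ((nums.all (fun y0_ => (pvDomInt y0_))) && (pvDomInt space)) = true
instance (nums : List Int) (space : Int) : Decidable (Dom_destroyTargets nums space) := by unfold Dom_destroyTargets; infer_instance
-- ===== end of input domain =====

-- B replaces A's quadratic searched-index nested scan by one dict pass counting each
-- residue class and a single scan of the sorted list (A sorts nums in place, B does not
-- mutate it; the equivalence proved is about the return value).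

-- ===== PORT A =====
def aInnerStep (xs : List Int) (space i : Int) (st : PySem.Set Int × Int) (j : Int) : PySem.Set Int × Int :=
  if PySem.Set.contains st.1 j then st
  else if PySem.Int.mod (PySem.List.pyGetD xs j 0 - PySem.List.pyGetD xs i 0) space == 0 then
    (PySem.Set.add st.1 j, st.2 + 1)
  else st

def aOuterStep (xs : List Int) (space n : Int) (st : PySem.Set Int × Int × Int) (i : Int) :
    PySem.Set Int × Int × Int :=
  if PySem.Set.contains st.1 i then st
  else
    let inner := (PySem.List.pyRange (i + 1) n).foldl (aInnerStep xs space i) (PySem.Set.add st.1 i, 1)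
    if inner.2 > st.2.2 then (inner.1, PySem.List.pyGetD xs i 0, inner.2)
    else (inner.1, st.2.1, st.2.2)

def destroyTargets (nums : List Int) (space : Int) : Int :=
  let n : Int := nums.length
  let xs := PySem.List.sorted nums (fun x => x)
  (((PySem.List.pyRange 0 n).foldl (aOuterStep xs space n) (PySem.Set.empty, 1000000000, 0)).2).1

-- ===== PORT B =====
def bCount (xs : List Int) (space : Int) : PySem.Dict Int Int :=
  xs.foldl (fun d x => d.insert (PySem.Int.mod x space) (d.getD (PySem.Int.mod x space) 0 + 1)) PySem.Dict.empty

def bStep (cnt : PySem.Dict Int Int) (space : Int) (st : Option Int × Int) (x : Int) : Option Int × Int :=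
  let c := cnt.getD (PySem.Int.mod x space) 0
  if c > st.2 then (some x, c) else st

def destroyTargets_alt (nums : List Int) (space : Int) : Int :=
  let xs := PySem.List.sorted nums (fun x => x)
  let cnt := bCount xs space
  ((xs.foldl (bStep cnt space) (none, 0)).1).getD 0

-- ===== PRECONDITION & SPEC =====
-- Pre_ excludes the empty list (A returns the sentinel 10^9 where B has no answer to give)
-- and space = 0 (A raises ZeroDivisionError whenever len(nums) ≥ 2; B always raises there).
def Pre_destroyTargets (nums : List Int) (space : Int) : Prop := nums ≠ [] ∧ space ≠ 0
instance (nums : List Int) (space : Int) : Decidable (Pre_destroyTargets nums space) := by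
  unfold Pre_destroyTargets; infer_instance
def pvWitness_destroyTargets : List Int × Int := ([1, 2, 4], 2)

def Spec_destroyTargets (nums : List Int) (space : Int) (out : Int) : Prop := out = destroyTargets_alt nums space
instance (nums : List Int) (space : Int) (out : Int) : Decidable (Spec_destroyTargets nums space out) := by
  unfold Spec_destroyTargets; infer_instance

-- ===== CLAIM (what is proved, stated in full; the proofs are below) =====
def Claim_equal_destroyTargets : Prop := ∀ (nums : List Int) (space : Int), Dom_destroyTargets nums space → Pre_destroyTargets nums space → Spec_destroyTargets nums space (destroyTargets nums space)

-- ===== LEMMAS AND PROOFS =====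

-- residue of the element at index j, and the size of a residue class
def gI (xs : List Int) (space j : Int) : Int := PySem.Int.mod (PySem.List.pyGetD xs j 0) space
def CC (xs : List Int) (space r : Int) : Int := ((xs.map (fun x => PySem.Int.mod x space)).count r : Int)

theorem mod_sub_eq_zero_iff (a b s : Int) (hs : s ≠ 0) :
    PySem.Int.mod (a - b) s = 0 ↔ PySem.Int.mod a s = PySem.Int.mod b s := by
  rw [PySem.Int.mod_eq_zero_iff_dvd]
  have ha := PySem.Int.floordiv_mul_add_mod a s
  have hb := PySem.Int.floordiv_mul_add_mod b s
  constructor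
  · intro h
    have h2 : s ∣ (PySem.Int.mod a s - PySem.Int.mod b s) := by
      have : PySem.Int.mod a s - PySem.Int.mod b s
          = (a - b) - (PySem.Int.floordiv a s - PySem.Int.floordiv b s) * s := by linear_combination ha - hb
      rw [this]
      exact dvd_sub h (dvd_mul_left s _)
    have habs : |PySem.Int.mod a s - PySem.Int.mod b s| < |s| := by
      rcases lt_or_gt_of_ne hs with hneg | hpos
      · have h1 := PySem.Int.mod_neg_bounds a hneg
        have h2 := PySem.Int.mod_neg_bounds b hneg
        rw [abs_lt, abs_of_neg hneg]; omega
      · have h1 := PySem.Int.mod_nonneg a hpos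
        have h2 := PySem.Int.mod_nonneg b hpos
        have h3 := PySem.Int.mod_lt a hpos
        have h4 := PySem.Int.mod_lt b hpos
        rw [abs_lt, abs_of_pos hpos]; omega
    have := Int.eq_zero_of_abs_lt_dvd ((abs_dvd s _).mpr h2) habs
    omega
  · intro h
    exact ⟨PySem.Int.floordiv a s - PySem.Int.floordiv b s, by linear_combination -ha + hb + h⟩

theorem bCount_getD (xs : List Int) (space r : Int) :
    (bCount xs space).getD r 0 = CC xs space r := by
  unfold bCount CC
  have h : (List.foldl (fun d x => d.insert (PySem.Int.mod x space) (d.getD (PySem.Int.mod x space) 0 + 1)) (PySem.Dict.empty : PySem.Dict Int Int) xs)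
      = (xs.map (fun x => PySem.Int.mod x space)).foldl (fun d x => d.insert x (d.getD x 0 + 1)) PySem.Dict.empty :=
    (List.foldl_map (f := fun x => PySem.Int.mod x space) (g := fun (d : PySem.Dict Int Int) x => d.insert x (d.getD x 0 + 1)) (l := xs) (init := PySem.Dict.empty)).symm
  refine (congrArg (fun d => PySem.Dict.getD d r 0) h).trans ?_
  rw [PySem.Dict.getD_foldl_insert_add_one]
  simp [PySem.Dict.getD_empty]

theorem countP_range_getD (xs : List Int) (p : Int → Bool) (d : Int) :
    (List.range xs.length).countP (fun j => p (xs.getD j d)) = xs.countP p := by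
  induction xs with
  | nil => simp
  | cons a t ih =>
    rw [List.length_cons, List.range_succ_eq_map, List.countP_cons, List.countP_map]
    simp only [List.getD_cons_zero, List.getD_cons_succ, Function.comp_def]
    rw [List.countP_cons, ih]

theorem countP_pyRange_g (xs : List Int) (space r : Int) :
    (((PySem.List.pyRange 0 (xs.length : Int)).countP
        (fun j => gI xs space j == r) : Nat) : Int) = CC xs space r := by
  rw [PySem.List.pyRange_zero_natCast, List.countP_map]
  unfold gI CC
  simp only [Function.comp_def, PySem.List.pyGetD_natCast]
  rw [countP_range_getD xs (fun x => PySem.Int.mod x space == r) 0]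
  rw [List.count_eq_countP, List.countP_map]
  simp [Function.comp_def]

theorem nodup_pyRange (a b : Int) : (PySem.List.pyRange a b).Nodup := by
  have : ∀ (N : Nat) (a b : Int), (b - a).toNat = N → (PySem.List.pyRange a b).Nodup := by
    intro N
    induction N with
    | zero =>
      intro a b h
      have hb : b ≤ a := by omega
      have : PySem.List.pyRange a b = [] := by
        rw [List.eq_nil_iff_forall_not_mem]
        intro x hx
        rw [PySem.List.mem_pyRange_one] at hx
        omega
      simp [this]
    | succ n ih =>
      intro a b h
      have hab : a < b := by omega
      rw [PySem.List.pyRange_one_cons hab]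
      refine List.nodup_cons.mpr ⟨?_, ih (a+1) b (by omega)⟩
      intro hx
      rw [PySem.List.mem_pyRange_one] at hx
      omega
  exact this _ a b rfl

theorem inner_loop_spec (xs : List Int) (space i : Int) :
    ∀ (js : List Int) (T : PySem.Set Int) (c : Int), js.Nodup →
      (∀ x : Int, x ∈ (js.foldl (aInnerStep xs space i) (T, c)).1 ↔
          x ∈ T ∨ (x ∈ js ∧ PySem.Int.mod (PySem.List.pyGetD xs x 0 - PySem.List.pyGetD xs i 0) space = 0)) ∧
      (js.foldl (aInnerStep xs space i) (T, c)).2 =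
        c + ((js.countP (fun j => !(PySem.Set.contains T j) &&
              (PySem.Int.mod (PySem.List.pyGetD xs j 0 - PySem.List.pyGetD xs i 0) space == 0)) : Nat) : Int) := by
  intro js
  induction js with
  | nil => intro T c _; simp
  | cons j rest ih =>
    intro T c hnd
    have hndr := (List.nodup_cons.mp hnd).2
    have hjr : j ∉ rest := (List.nodup_cons.mp hnd).1
    rw [List.foldl_cons]
    by_cases hT : PySem.Set.contains T j = true
    · have hstep : aInnerStep xs space i (T, c) j = (T, c) := by
        unfold aInnerStep; rw [if_pos hT]
      rw [hstep]
      obtain ⟨hmem, hcnt⟩ := ih T c hndr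
      refine ⟨fun x => ?_, ?_⟩
      · rw [hmem x]
        constructor
        · rintro (h | ⟨h1, h2⟩)
          · exact Or.inl h
          · exact Or.inr ⟨List.mem_cons_of_mem _ h1, h2⟩
        · rintro (h | ⟨h1, h2⟩)
          · exact Or.inl h
          · rcases List.mem_cons.mp h1 with rfl | h1
            · exact Or.inl ((PySem.Set.contains_iff T x).mp hT)
            · exact Or.inr ⟨h1, h2⟩
      · rw [hcnt, List.countP_cons]
        have hpj : (!(PySem.Set.contains T j) &&
            (PySem.Int.mod (PySem.List.pyGetD xs j 0 - PySem.List.pyGetD xs i 0) space == 0)) = false := by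
          rw [hT]; rfl
        rw [hpj]
        simp
    · by_cases hc : PySem.Int.mod (PySem.List.pyGetD xs j 0 - PySem.List.pyGetD xs i 0) space = 0
      · have hstep : aInnerStep xs space i (T, c) j = (PySem.Set.add T j, c + 1) := by
          unfold aInnerStep; rw [if_neg hT, if_pos (beq_iff_eq.mpr hc)]
        rw [hstep]
        obtain ⟨hmem, hcnt⟩ := ih (PySem.Set.add T j) (c + 1) hndr
        refine ⟨fun x => ?_, ?_⟩
        · rw [hmem x, PySem.Set.mem_add]
          constructor
          · rintro ((h | rfl) | ⟨h1, h2⟩)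
            · exact Or.inl h
            · exact Or.inr ⟨List.mem_cons_self .., hc⟩
            · exact Or.inr ⟨List.mem_cons_of_mem _ h1, h2⟩
          · rintro (h | ⟨h1, h2⟩)
            · exact Or.inl (Or.inl h)
            · rcases List.mem_cons.mp h1 with rfl | h1
              · exact Or.inl (Or.inr rfl)
              · exact Or.inr ⟨h1, h2⟩
        · rw [hcnt]
          have hcongr : rest.countP (fun k => !(PySem.Set.contains (PySem.Set.add T j) k) &&
                (PySem.Int.mod (PySem.List.pyGetD xs k 0 - PySem.List.pyGetD xs i 0) space == 0))
              = rest.countP (fun k => !(PySem.Set.contains T k) &&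
                (PySem.Int.mod (PySem.List.pyGetD xs k 0 - PySem.List.pyGetD xs i 0) space == 0)) := by
            apply List.countP_congr
            intro k hk
            have hkj : k ≠ j := fun h => hjr (h ▸ hk)
            have hck : PySem.Set.contains (PySem.Set.add T j) k = PySem.Set.contains T k := by
              rw [Bool.eq_iff_iff, PySem.Set.contains_iff, PySem.Set.contains_iff, PySem.Set.mem_add]
              tauto
            rw [hck]
          rw [hcongr, List.countP_cons]
          have hpj : (!(PySem.Set.contains T j) &&
              (PySem.Int.mod (PySem.List.pyGetD xs j 0 - PySem.List.pyGetD xs i 0) space == 0)) = true := by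
            rw [Bool.not_eq_true] at hT
            rw [hT]
            simp [hc]
          rw [hpj, if_pos rfl]
          push_cast
          ring
      · have hstep : aInnerStep xs space i (T, c) j = (T, c) := by
          unfold aInnerStep; rw [if_neg hT, if_neg (by simpa using hc)]
        rw [hstep]
        obtain ⟨hmem, hcnt⟩ := ih T c hndr
        refine ⟨fun x => ?_, ?_⟩
        · rw [hmem x]
          constructor
          · rintro (h | ⟨h1, h2⟩)
            · exact Or.inl h
            · exact Or.inr ⟨List.mem_cons_of_mem _ h1, h2⟩
          · rintro (h | ⟨h1, h2⟩)
            · exact Or.inl h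
            · rcases List.mem_cons.mp h1 with rfl | h1
              · exact absurd h2 hc
              · exact Or.inr ⟨h1, h2⟩
        · rw [hcnt, List.countP_cons]
          have hpj : (!(PySem.Set.contains T j) &&
              (PySem.Int.mod (PySem.List.pyGetD xs j 0 - PySem.List.pyGetD xs i 0) space == 0)) = false := by
            simp [hc]
          rw [hpj]
          simp

def InvA (xs : List Int) (space : Int) (m : Nat) (st : PySem.Set Int × Int × Int) (bst : Option Int × Int) : Prop :=
  (∀ j : Int, j ∈ st.1 ↔ (0 ≤ j ∧ j < (xs.length : Int) ∧
      ∃ k : Int, 0 ≤ k ∧ k < (m : Int) ∧ gI xs space k = gI xs space j))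
  ∧ st.2.1 = bst.1.getD 1000000000
  ∧ st.2.2 = bst.2
  ∧ (bst.1 = none → bst.2 = 0 ∧ m = 0)
  ∧ (∀ k : Int, 0 ≤ k → k < (m : Int) → CC xs space (gI xs space k) ≤ bst.2)

theorem main_inv (xs : List Int) (space : Int) (hs : space ≠ 0) :
    ∀ m : Nat, m ≤ xs.length →
      InvA xs space m
        ((PySem.List.pyRange 0 (m : Int)).foldl (aOuterStep xs space (xs.length : Int))
          (PySem.Set.empty, 1000000000, 0))
        ((xs.take m).foldl (bStep (bCount xs space) space) (none, 0)) := by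
  intro m
  induction m with
  | zero =>
    intro _
    refine ⟨fun j => ?_, rfl, rfl, fun _ => ⟨rfl, rfl⟩, fun k _ hk => by exact absurd hk (by omega)⟩
    constructor
    · intro h; exact absurd h (by simp [PySem.Set.empty])
    · rintro ⟨_, _, k, hk0, hk1, _⟩; omega
  | succ m ih =>
    intro hm1
    have hm : m < xs.length := hm1
    obtain ⟨hS, hmn, hmc, hnone, hbc⟩ := ih (le_of_lt hm)
    have hcast : ((m + 1 : Nat) : Int) = (m : Int) + 1 := by push_cast; ring
    rw [hcast, PySem.List.pyRange_one_succ_right (by omega : (0:Int) ≤ (m:Int)),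
        List.foldl_append, List.foldl_cons, List.foldl_nil]
    rw [List.take_add_one, List.getElem?_eq_getElem hm]
    simp only [Option.toList_some]
    rw [List.foldl_append, List.foldl_cons, List.foldl_nil]
    set stA := (PySem.List.pyRange 0 (m : Int)).foldl (aOuterStep xs space (xs.length : Int))
        (PySem.Set.empty, 1000000000, 0) with hstA
    set stB := (xs.take m).foldl (bStep (bCount xs space) space) (none, 0) with hstB
    have hx : PySem.List.pyGetD xs (m : Int) 0 = xs[m] := by
      rw [PySem.List.pyGetD_natCast]; exact List.getD_eq_getElem xs 0 hm
    have hgm : gI xs space (m : Int) = PySem.Int.mod xs[m] space := by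
      unfold gI; rw [hx]
    have hcval : (bCount xs space).getD (PySem.Int.mod xs[m] space) 0
        = CC xs space (gI xs space (m : Int)) := by rw [bCount_getD, hgm]
    by_cases hLead : ∃ k : Int, 0 ≤ k ∧ k < (m : Int) ∧ gI xs space k = gI xs space (m : Int)
    · -- index m was already searched: both sides keep their state
      have hmem : (m : Int) ∈ stA.1 := (hS _).mpr ⟨by omega, by exact_mod_cast hm, hLead⟩
      have hAeq : aOuterStep xs space (xs.length : Int) stA (m : Int) = stA := by
        unfold aOuterStep; rw [if_pos ((PySem.Set.contains_iff _ _).mpr hmem)]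
      obtain ⟨k, hk0, hk1, hgk⟩ := hLead
      have hle : (bCount xs space).getD (PySem.Int.mod xs[m] space) 0 ≤ stB.2 := by
        rw [hcval, ← hgk]; exact hbc k hk0 hk1
      have hBeq : bStep (bCount xs space) space stB xs[m] = stB := by
        unfold bStep; exact if_neg (not_lt.mpr hle)
      rw [hAeq, hBeq]
      refine ⟨fun j => ?_, hmn, hmc, fun h => ?_, fun k' hk'0 hk'1 => ?_⟩
      · rw [hS j]
        constructor
        · rintro ⟨h0, h1, k', hk'0, hk'1, hg⟩
          exact ⟨h0, h1, k', hk'0, by omega, hg⟩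
        · rintro ⟨h0, h1, k', hk'0, hk'1, hg⟩
          rcases (by omega : k' < (m : Int) ∨ k' = (m : Int)) with h | rfl
          · exact ⟨h0, h1, k', hk'0, h, hg⟩
          · exact ⟨h0, h1, k, hk0, hk1, hgk.trans hg⟩
      · obtain ⟨hb2, hm0⟩ := hnone h
        subst hm0
        exact absurd hk1 (by omega)
      · rcases (by omega : k' < (m : Int) ∨ k' = (m : Int)) with h | rfl
        · exact hbc k' hk'0 h
        · rw [hcval] at hle
          exact hle
    · -- index m starts a fresh residue class
      have hncont : ¬ PySem.Set.contains stA.1 (m : Int) = true := by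
        intro h
        exact hLead (((hS _).mp ((PySem.Set.contains_iff _ _).mp h)).2.2)
      obtain ⟨hImem, hIcnt⟩ := inner_loop_spec xs space (m : Int)
        (PySem.List.pyRange ((m : Int) + 1) (xs.length : Int))
        (PySem.Set.add stA.1 (m : Int)) 1 (nodup_pyRange _ _)
      set inner := (PySem.List.pyRange ((m : Int) + 1) (xs.length : Int)).foldl
          (aInnerStep xs space (m : Int)) (PySem.Set.add stA.1 (m : Int), 1) with hinner
      -- the inner count equals the residue-class size
      have hcongrP : (PySem.List.pyRange ((m : Int) + 1) (xs.length : Int)).countP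
            (fun j => !(PySem.Set.contains (PySem.Set.add stA.1 (m : Int)) j) &&
              (PySem.Int.mod (PySem.List.pyGetD xs j 0 - PySem.List.pyGetD xs (m : Int) 0) space == 0))
          = (PySem.List.pyRange ((m : Int) + 1) (xs.length : Int)).countP
            (fun j => gI xs space j == gI xs space (m : Int)) := by
        apply List.countP_congr
        intro j hj
        rw [PySem.List.mem_pyRange_one] at hj
        have hmod : (PySem.Int.mod (PySem.List.pyGetD xs j 0 - PySem.List.pyGetD xs (m : Int) 0) space == 0)
            = (gI xs space j == gI xs space (m : Int)) := by
          rw [Bool.eq_iff_iff]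
          simp only [beq_iff_eq]
          exact mod_sub_eq_zero_iff _ _ _ hs
        rw [hmod]
        by_cases hg : gI xs space j = gI xs space (m : Int)
        · have hnc : PySem.Set.contains (PySem.Set.add stA.1 (m : Int)) j = false := by
            rw [← Bool.not_eq_true, PySem.Set.contains_iff, PySem.Set.mem_add]
            rintro (hin | rfl)
            · exact hLead (hg ▸ ((hS _).mp hin).2.2)
            · omega
          rw [hnc]
          simp
        · have : (gI xs space j == gI xs space (m : Int)) = false := beq_eq_false_iff_ne.mpr hg
          rw [this, Bool.and_false]
      have hcnt0 : (PySem.List.pyRange 0 (m : Int)).countP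
          (fun j => gI xs space j == gI xs space (m : Int)) = 0 := by
        apply List.countP_eq_zero.mpr
        intro k hk
        rw [PySem.List.mem_pyRange_one] at hk
        simp only [beq_iff_eq]
        intro hg
        exact hLead ⟨k, hk.1, hk.2, hg⟩
      have hsplit : PySem.List.pyRange 0 (xs.length : Int)
          = PySem.List.pyRange 0 ((m : Int) + 1) ++ PySem.List.pyRange ((m : Int) + 1) (xs.length : Int) :=
        PySem.List.pyRange_one_append 0 ((m : Int) + 1) (xs.length : Int) (by omega) (by exact_mod_cast hm)
      have hCC : inner.2 = CC xs space (gI xs space (m : Int)) := by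
        rw [← countP_pyRange_g xs space (gI xs space (m : Int)), hsplit,
            PySem.List.pyRange_one_succ_right (by omega : (0:Int) ≤ (m:Int))]
        rw [List.countP_append, List.countP_append, hcnt0]
        have h1 : [(m : Int)].countP (fun j => gI xs space j == gI xs space (m : Int)) = 1 := by
          rw [List.countP_singleton]
          simp
        rw [h1, hIcnt, hcongrP]
        push_cast
        ring
      -- membership characterisation of the grown searched set
      have hmem' : ∀ x : Int, x ∈ inner.1 ↔ (0 ≤ x ∧ x < (xs.length : Int) ∧
          ∃ k : Int, 0 ≤ k ∧ k < (m : Int) + 1 ∧ gI xs space k = gI xs space x) := by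
        intro x
        rw [hImem x, PySem.Set.mem_add]
        constructor
        · rintro ((hin | rfl) | ⟨hr, hmod⟩)
          · obtain ⟨h0, h1, k, hk0, hk1, hg⟩ := (hS _).mp hin
            exact ⟨h0, h1, k, hk0, by omega, hg⟩
          · exact ⟨by omega, by exact_mod_cast hm, (m : Int), by omega, by omega, rfl⟩
          · rw [PySem.List.mem_pyRange_one] at hr
            have hg : gI xs space x = gI xs space (m : Int) :=
              (mod_sub_eq_zero_iff _ _ _ hs).mp hmod
            exact ⟨by omega, hr.2, (m : Int), by omega, by omega, hg.symm⟩
        · rintro ⟨h0, h1, k, hk0, hk1, hg⟩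
          rcases (by omega : k < (m : Int) ∨ k = (m : Int)) with hkm | rfl
          · exact Or.inl (Or.inl ((hS _).mpr ⟨h0, h1, k, hk0, hkm, hg⟩))
          · rcases (by omega : x < (m : Int) ∨ x = (m : Int) ∨ (m : Int) + 1 ≤ x) with hlt | rfl | hgt
            · exact Or.inl (Or.inl ((hS _).mpr ⟨h0, h1, x, h0, hlt, rfl⟩))
            · exact Or.inl (Or.inr rfl)
            · refine Or.inr ⟨PySem.List.mem_pyRange_one.mpr ⟨hgt, h1⟩, ?_⟩
              exact (mod_sub_eq_zero_iff _ _ _ hs).mpr hg.symm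
      have hCCpos : 1 ≤ CC xs space (gI xs space (m : Int)) := by
        unfold CC
        rw [hgm]
        have : PySem.Int.mod xs[m] space ∈ xs.map (fun x => PySem.Int.mod x space) :=
          List.mem_map.mpr ⟨xs[m], List.getElem_mem hm, rfl⟩
        have := List.count_pos_iff.mpr this
        omega
      -- A and B take the same branch
      have hAeq : aOuterStep xs space (xs.length : Int) stA (m : Int)
          = (if inner.2 > stA.2.2 then (inner.1, PySem.List.pyGetD xs (m : Int) 0, inner.2)
             else (inner.1, stA.2.1, stA.2.2)) := by
        unfold aOuterStep
        rw [if_neg hncont]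
      have hBeq : bStep (bCount xs space) space stB xs[m]
          = (if CC xs space (gI xs space (m : Int)) > stB.2 then (some xs[m], CC xs space (gI xs space (m : Int))) else stB) := by
        unfold bStep
        rw [hcval]
      rw [hAeq, hBeq]
      by_cases hgt : CC xs space (gI xs space (m : Int)) > stB.2
      · rw [if_pos (by rw [hCC, hmc]; exact hgt), if_pos hgt]
        refine ⟨hmem', by exact hx, hCC, fun h => by simp at h, fun k hk0 hk1 => ?_⟩
        rcases (by omega : k < (m : Int) ∨ k = (m : Int)) with h | rfl
        · exact le_of_lt (lt_of_le_of_lt (hbc k hk0 h) hgt)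
        · exact le_refl _
      · rw [if_neg (by rw [hCC, hmc]; exact hgt), if_neg hgt]
        refine ⟨hmem', hmn, hmc, fun h => ?_, fun k hk0 hk1 => ?_⟩
        · obtain ⟨hb2, hm0⟩ := hnone h
          rw [hb2] at hgt
          omega
        · rcases (by omega : k < (m : Int) ∨ k = (m : Int)) with h | rfl
          · exact hbc k hk0 h
          · exact not_lt.mp hgt

-- ===== VERDICT (by name: the statement is the Claim_ definition above) =====
theorem destroyTargets_spec : Claim_equal_destroyTargets := by
  intro nums space _ hpre
  obtain ⟨hnil, hs⟩ := hpre
  unfold Spec_destroyTargets destroyTargets destroyTargets_alt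
  simp only []
  have hlen : (PySem.List.sorted nums (fun x => x)).length = nums.length :=
    (PySem.List.sorted_perm nums (fun x => x) false).length_eq
  rw [show ((nums.length : Int)) = (((PySem.List.sorted nums (fun x => x)).length : Int)) from by rw [hlen]]
  have hinv := main_inv (PySem.List.sorted nums (fun x => x)) space hs
    (PySem.List.sorted nums (fun x => x)).length le_rfl
  rw [List.take_length] at hinv
  obtain ⟨-, hmn, -, hnone, -⟩ := hinv
  rw [hmn]
  cases hb : ((PySem.List.sorted nums (fun x => x)).foldl
      (bStep (bCount (PySem.List.sorted nums (fun x => x)) space) space) (none, 0)).1 with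
  | none =>
    exfalso
    have h0 := (hnone hb).2
    exact hnil ((PySem.List.sorted_eq_nil_iff nums (fun x => x) false).mp (List.length_eq_zero_iff.mp h0))
  | some v => rfl
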